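-- pv_equiv track=rewrite | github.com/mikepsinn/disease-eradication-plan | scripts/remove-leading-blank-lines.py | remove_leading_blank_lines
-- ===== SOURCE A (Python) =====
-- def remove_leading_blank_lines(content):
--     """Remove leading blank lines from file content."""
--     lines = content.split('\n')
--
--     # Find first non-blank line
--     first_non_blank = 0
--     for i, line in enumerate(lines):
--         if line.strip():  # Non-blank line found
--             first_non_blank = i
--             break
--
--     # If all lines are blank, return original
--     if first_non_blank == len(lines) - 1 and not lines[-1].strip():
--         return content
--
--     # Return content starting from first non-blank line
--     return '\n'.join(lines[first_non_blank:])
-- ===== SOURCE B (Python) =====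
-- def remove_leading_blank_lines(content):
--     """Remove leading blank lines from file content.
--
--     Single pass over the raw characters: track the start index of the
--     current line; at the first non-whitespace character return the
--     suffix from that line's start. No split/join, no line list.
--     """
--     line_start = 0
--     for i, ch in enumerate(content):
--         if ch == '\n':
--             line_start = i + 1
--         elif not ch.isspace():
--             return content[line_start:]
--     return content
-- ===== Notes on version B (the rewrite author's own statement) =====
-- stated objective: simpler
-- what changed: Replaces the split-into-lines / per-line strip / join-of-the-tail pipeline by a single character scan that tracks the current line's start index and returns one suffix slice at the first non-whitespace character.
import Mathlib
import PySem

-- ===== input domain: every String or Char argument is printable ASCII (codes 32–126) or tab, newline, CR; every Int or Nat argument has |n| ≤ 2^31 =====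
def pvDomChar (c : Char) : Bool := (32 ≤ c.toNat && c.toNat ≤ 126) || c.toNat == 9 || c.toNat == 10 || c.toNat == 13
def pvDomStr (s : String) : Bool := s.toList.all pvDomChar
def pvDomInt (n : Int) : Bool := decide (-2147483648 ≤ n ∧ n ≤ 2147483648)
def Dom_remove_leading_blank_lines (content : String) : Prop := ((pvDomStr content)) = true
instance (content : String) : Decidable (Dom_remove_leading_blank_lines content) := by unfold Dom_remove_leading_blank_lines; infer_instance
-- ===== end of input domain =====

-- B replaces A's split-into-lines / per-line strip / join-of-the-tail pipeline by a single
-- character scan that tracks the current line's start index and returns one suffix slice (objective: simpler).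

-- ===== PORT A =====
-- the 'for i, line in enumerate(lines): if line.strip(): first_non_blank = i; break' loop
-- (first_non_blank stays 0 when every line is blank, exactly as in the Python)
def aFind (lines : List (List Char)) (i : Nat) : Nat :=
  match lines with
  | [] => 0
  | l :: rest => if PySem.Chars.strip l ≠ [] then i else aFind rest (i + 1)

def remove_leading_blank_lines (content : String) : String :=
  let lines := PySem.Chars.splitOn content.toList ['\n']
  let f := aFind lines 0
  if f = lines.length - 1 ∧ PySem.Chars.strip (PySem.List.pyGetD lines (-1) []) = [] then
    content
  else
    String.ofList (PySem.Chars.join ['\n'] (lines.drop f))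

-- ===== PORT B =====
-- the 'for i, ch in enumerate(content)' scan; content[line_start:] with 0 ≤ line_start ≤ len is List.drop
def bGo (full : List Char) (i lineStart : Nat) : List Char :=
  if h : i < full.length then
    if full[i] = '\n' then bGo full (i + 1) (i + 1)
    else if PySem.Chars.isspace full[i] then bGo full (i + 1) lineStart
    else full.drop lineStart
  else full
termination_by full.length - i

def remove_leading_blank_lines_alt (content : String) : String :=
  String.ofList (bGo content.toList 0 0)

-- ===== PRECONDITION & SPEC =====
def Spec_remove_leading_blank_lines (content : String) (out : String) : Prop := out = remove_leading_blank_lines_alt content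
instance (content : String) (out : String) : Decidable (Spec_remove_leading_blank_lines content out) := by unfold Spec_remove_leading_blank_lines; infer_instance

-- ===== CLAIM (what is proved, stated in full; the proofs are below) =====
def Claim_equal_remove_leading_blank_lines : Prop := ∀ (content : String), Dom_remove_leading_blank_lines content → Spec_remove_leading_blank_lines content (remove_leading_blank_lines content)

-- ===== LEMMAS AND PROOFS =====

-- proof-side structural splitter: PySem.Chars.splitOn cs ['\n'] computes this
def sp : List Char → List (List Char)
  | [] => [[]]
  | c :: r => if c = '\n' then [] :: sp r else (sp r).modifyHead (c :: ·)

lemma sp_ne_nil (cs : List Char) : sp cs ≠ [] := by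
  induction cs with
  | nil => simp [sp]
  | cons c r ih =>
    simp only [sp]
    split
    · simp
    · cases hr : sp r with
      | nil => exact absurd hr ih
      | cons a l => simp [List.modifyHead]

lemma go_nil (cur : List Char) (acc : List (List Char)) (fuel : Nat) :
    PySem.Chars.splitOn.go ['\n'] fuel [] cur acc = (cur.reverse :: acc).reverse := by
  cases fuel <;> rw [PySem.Chars.splitOn.go] <;> simp

lemma go_newline (fuel : Nat) (rest cur : List Char) (acc : List (List Char)) :
    PySem.Chars.splitOn.go ['\n'] (fuel + 1) ('\n' :: rest) cur acc
      = PySem.Chars.splitOn.go ['\n'] fuel rest [] (cur.reverse :: acc) := by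
  rw [PySem.Chars.splitOn.go]; simp [List.isPrefixOf]

lemma go_other (fuel : Nat) (rest cur : List Char) (acc : List (List Char)) (c : Char) (h : c ≠ '\n') :
    PySem.Chars.splitOn.go ['\n'] (fuel + 1) (c :: rest) cur acc
      = PySem.Chars.splitOn.go ['\n'] fuel rest (c :: cur) acc := by
  rw [PySem.Chars.splitOn.go]
  simp only [List.isPrefixOf, Bool.and_eq_true, beq_iff_eq]
  rw [if_neg]
  simp [eq_comm, h]

lemma go_eq_sp (cs : List Char) : ∀ (fuel : Nat), cs.length ≤ fuel → ∀ (cur : List Char) (acc : List (List Char)),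
    PySem.Chars.splitOn.go ['\n'] fuel cs cur acc = acc.reverse ++ (sp cs).modifyHead (cur.reverse ++ ·) := by
  induction cs with
  | nil => intro fuel _ cur acc; rw [go_nil]; simp [sp, List.modifyHead]
  | cons c r ih =>
    intro fuel hf cur acc
    cases fuel with
    | zero => simp at hf
    | succ fuel =>
      simp only [List.length_cons, Nat.add_le_add_iff_right] at hf
      by_cases hc : c = '\n'
      · subst hc
        rw [go_newline, ih fuel hf [] (cur.reverse :: acc)]
        cases hr : sp r <;> simp [sp, List.modifyHead, hr]
      · rw [go_other _ _ _ _ _ hc, ih fuel hf (c :: cur) acc]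
        cases hr : sp r with
        | nil => exact absurd hr (sp_ne_nil r)
        | cons a l => simp [sp, hc, List.modifyHead, hr]

lemma splitOn_eq_sp (cs : List Char) : PySem.Chars.splitOn cs ['\n'] = sp cs := by
  show PySem.Chars.splitOn.go ['\n'] (cs.length + 1) cs [] [] = sp cs
  rw [go_eq_sp cs (cs.length + 1) (by omega) [] []]
  cases hr : sp cs with
  | nil => exact absurd hr (sp_ne_nil cs)
  | cons a l => simp [List.modifyHead]

lemma join_sp (cs : List Char) : PySem.Chars.join ['\n'] (sp cs) = cs := by
  induction cs with
  | nil => simp [sp, PySem.Chars.join_singleton]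
  | cons c r ih =>
    by_cases hc : c = '\n'
    · subst hc
      rw [show sp ('\n' :: r) = [] :: sp r by simp [sp]]
      cases hr : sp r with
      | nil => exact absurd hr (sp_ne_nil r)
      | cons a l =>
        rw [PySem.Chars.join_cons_cons, ← hr, ih]; simp
    · rw [show sp (c :: r) = (sp r).modifyHead (c :: ·) by simp [sp, hc]]
      cases hr : sp r with
      | nil => exact absurd hr (sp_ne_nil r)
      | cons a l =>
        cases l with
        | nil =>
          rw [hr] at ih
          simp [List.modifyHead, PySem.Chars.join_singleton] at ih ⊢
          exact ih
        | cons b t =>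
          rw [hr] at ih
          rw [PySem.Chars.join_cons_cons] at ih
          simp only [List.modifyHead, PySem.Chars.join_cons_cons]
          rw [← ih]; simp

lemma strip_eq_nil_iff (l : List Char) :
    PySem.Chars.strip l = [] ↔ l.all PySem.Chars.isspace := by
  constructor
  · intro h
    by_contra hall
    simp only [List.all_eq_true, not_forall] at hall
    simp only [PySem.Chars.strip, PySem.Chars.lstrip, PySem.Chars.rstrip] at h
    cases hd : List.dropWhile PySem.Chars.isspace l with
    | nil =>
      rw [List.dropWhile_eq_nil_iff] at hd
      obtain ⟨x, hx, hpx⟩ := hall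
      exact hpx (hd x hx)
    | cons a t =>
      have ha : ¬ PySem.Chars.isspace a = true := by
        have := List.head_dropWhile_not (p := PySem.Chars.isspace) (l := l)
        rw [hd] at this; simpa using this (by simp)
      rw [hd] at h
      have : List.dropWhile PySem.Chars.isspace (a :: t).reverse = [] := by
        simpa using h
      rw [List.dropWhile_eq_nil_iff] at this
      exact ha (this a (by simp))
  · intro h
    have h1 : List.dropWhile PySem.Chars.isspace l = [] := by
      rw [List.dropWhile_eq_nil_iff]
      intro x hx; exact (List.all_eq_true.mp h) x hx
    simp [PySem.Chars.strip, PySem.Chars.lstrip, PySem.Chars.rstrip, h1]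

lemma sp_no_newline (cs : List Char) (h : '\n' ∉ cs) : sp cs = [cs] := by
  induction cs with
  | nil => simp [sp]
  | cons c r ih =>
    have hc : c ≠ '\n' := by rintro rfl; exact h (by simp)
    rw [show sp (c :: r) = (sp r).modifyHead (c :: ·) by simp [sp, hc]]
    rw [ih (fun hm => h (by simp [hm]))]
    simp [List.modifyHead]

lemma sp_cons_line (l rest : List Char) (h : '\n' ∉ l) :
    sp (l ++ '\n' :: rest) = l :: sp rest := by
  induction l with
  | nil => simp [sp]
  | cons c l' ih =>
    have hc : c ≠ '\n' := by rintro rfl; exact h (by simp)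
    have := ih (fun hm => h (by simp [hm]))
    simp only [List.cons_append, sp, if_neg hc, this, List.modifyHead]

lemma mem_sp_all_space (cs : List Char) (h : cs.all PySem.Chars.isspace) :
    ∀ x ∈ sp cs, x.all PySem.Chars.isspace := by
  induction cs with
  | nil => intro x hx; simp [sp] at hx; simp [hx]
  | cons c r ih =>
    simp only [List.all_cons, Bool.and_eq_true] at h
    intro x hx
    by_cases hc : c = '\n'
    · rw [show sp (c :: r) = [] :: sp r by simp [sp, hc]] at hx
      rcases List.mem_cons.mp hx with h1 | h1
      · simp [h1]
      · exact ih h.2 x h1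
    · rw [show sp (c :: r) = (sp r).modifyHead (c :: ·) by simp [sp, hc]] at hx
      cases hr : sp r with
      | nil => exact absurd hr (sp_ne_nil r)
      | cons a t =>
        rw [hr] at hx
        simp only [List.modifyHead] at hx
        rcases List.mem_cons.mp hx with h1 | h1
        · subst h1
          have ha := ih h.2 a (by simp [hr])
          simp [h.1, ha]
        · exact ih h.2 x (by simp [hr, h1])

lemma all_space_join (ls : List (List Char)) (h : ∀ x ∈ ls, x.all PySem.Chars.isspace) :
    (PySem.Chars.join ['\n'] ls).all PySem.Chars.isspace := by
  induction ls with
  | nil => simp [PySem.Chars.join_nil]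
  | cons a t ih =>
    cases t with
    | nil => rw [PySem.Chars.join_singleton]; exact h a (by simp)
    | cons b t' =>
      rw [PySem.Chars.join_cons_cons]
      have h1 := h a (by simp)
      have h2 := ih (fun x hx => h x (by simp [hx]))
      simp only [List.all_append, Bool.and_eq_true]
      exact ⟨⟨h1, by decide⟩, h2⟩

lemma exists_nonblank_of_not_all_space (cs : List Char) (h : ¬ cs.all PySem.Chars.isspace) :
    ∃ x ∈ sp cs, PySem.Chars.strip x ≠ [] := by
  by_contra hc
  simp only [ne_eq, not_exists, not_and, not_not] at hc
  apply h
  rw [← join_sp cs]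
  exact all_space_join _ (fun x hx => (strip_eq_nil_iff x).mp (hc x hx))

lemma aFind_blank (ls : List (List Char)) (h : ∀ x ∈ ls, PySem.Chars.strip x = []) (i : Nat) :
    aFind ls i = 0 := by
  induction ls generalizing i with
  | nil => simp [aFind]
  | cons l t ih =>
    have h1 := h l (by simp)
    simp only [aFind, h1, ne_eq, not_true_eq_false, if_false]
    exact ih (fun x hx => h x (by simp [hx])) (i + 1)

lemma aFind_shift (ls : List (List Char)) (h : ∃ x ∈ ls, PySem.Chars.strip x ≠ []) (i : Nat) :
    aFind ls i = i + aFind ls 0 := by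
  induction ls generalizing i with
  | nil => simp at h
  | cons l t ih =>
    by_cases hl : PySem.Chars.strip l = []
    · have ht : ∃ x ∈ t, PySem.Chars.strip x ≠ [] := by
        obtain ⟨x, hx, hxs⟩ := h
        rcases List.mem_cons.mp hx with h1 | h1
        · exact absurd (h1 ▸ hl) hxs
        · exact ⟨x, h1, hxs⟩
      simp only [aFind, hl, ne_eq, not_true_eq_false, if_false]
      rw [ih ht (i + 1), ih ht 1]
      omega
    · simp [aFind, hl]
  
lemma aFind_spec (ls : List (List Char)) (h : ∃ x ∈ ls, PySem.Chars.strip x ≠ []) :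
    aFind ls 0 < ls.length ∧ PySem.Chars.strip (ls.getD (aFind ls 0) []) ≠ [] := by
  induction ls with
  | nil => simp at h
  | cons l t ih =>
    by_cases hl : PySem.Chars.strip l = []
    · have ht : ∃ x ∈ t, PySem.Chars.strip x ≠ [] := by
        obtain ⟨x, hx, hxs⟩ := h
        rcases List.mem_cons.mp hx with h1 | h1
        · exact absurd (h1 ▸ hl) hxs
        · exact ⟨x, h1, hxs⟩
      have hshift : aFind (l :: t) 0 = 1 + aFind t 0 := by
        simp only [aFind, hl, ne_eq, not_true_eq_false, if_false]
        exact aFind_shift t ht 1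
      obtain ⟨ih1, ih2⟩ := ih ht
      constructor
      · rw [hshift]; simp; omega
      · rw [hshift]
        have : (l :: t).getD (1 + aFind t 0) [] = t.getD (aFind t 0) [] := by
          rw [show 1 + aFind t 0 = aFind t 0 + 1 by omega]
          simp [List.getD]
        rw [this]; exact ih2
    · simp [aFind, hl]

-- one-step unfolding lemmas for bGo
lemma bGo_ge (full : List Char) (i ls : Nat) (h : full.length ≤ i) : bGo full i ls = full := by
  rw [bGo]; simp [Nat.not_lt.mpr h]

lemma bGo_newline (full : List Char) (i ls : Nat) (h : i < full.length) (hc : full[i] = '\n') :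
    bGo full i ls = bGo full (i + 1) (i + 1) := by
  rw [bGo]; simp [h, hc]

lemma bGo_space (full : List Char) (i ls : Nat) (h : i < full.length)
    (hc : full[i] ≠ '\n') (hs : PySem.Chars.isspace full[i]) :
    bGo full i ls = bGo full (i + 1) ls := by
  rw [bGo]; simp [h, hc, hs]

lemma bGo_stop (full : List Char) (i ls : Nat) (h : i < full.length)
    (hs : ¬ PySem.Chars.isspace full[i]) :
    bGo full i ls = full.drop ls := by
  have hc : full[i] ≠ '\n' := by
    intro e; exact hs (by rw [e]; decide)
  rw [bGo]; simp [h, hc, hs]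

lemma bGo_all_space (full : List Char) :
    ∀ (n i ls : Nat), full.length - i ≤ n → (full.drop i).all PySem.Chars.isspace →
    bGo full i ls = full := by
  intro n
  induction n with
  | zero => intro i ls hn _; exact bGo_ge full i ls (by omega)
  | succ n ih =>
    intro i ls hn hsp
    by_cases hi : i < full.length
    · rw [List.drop_eq_getElem_cons hi, List.all_cons, Bool.and_eq_true] at hsp
      by_cases hc : full[i] = '\n'
      · rw [bGo_newline full i ls hi hc]
        exact ih (i + 1) (i + 1) (by omega) hsp.2
      · rw [bGo_space full i ls hi hc hsp.1]
        exact ih (i + 1) ls (by omega) hsp.2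
    · exact bGo_ge full i ls (by omega)

lemma bGo_find (full : List Char) :
    ∀ (n i ls : Nat), full.length - i ≤ n →
    ¬ (full.drop i).all PySem.Chars.isspace →
    '\n' ∉ (full.drop i).takeWhile PySem.Chars.isspace →
    bGo full i ls = full.drop ls := by
  intro n
  induction n with
  | zero =>
    intro i ls hn hall _
    exact absurd (by rw [List.drop_eq_nil_iff.mpr (by omega)]; simp) hall
  | succ n ih =>
    intro i ls hn hall htw
    by_cases hi : i < full.length
    · by_cases hs : PySem.Chars.isspace full[i]
      · have hc : full[i] ≠ '\n' := by
          intro e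
          apply htw
          rw [List.drop_eq_getElem_cons hi, List.takeWhile_cons, if_pos hs, ← e]
          simp
        rw [bGo_space full i ls hi hc hs]
        apply ih (i + 1) ls (by omega)
        · rw [List.drop_eq_getElem_cons hi, List.all_cons, Bool.and_eq_true] at hall
          intro h2; exact hall ⟨hs, h2⟩
        · intro hm
          apply htw
          rw [List.drop_eq_getElem_cons hi, List.takeWhile_cons, if_pos hs]
          simp [hm]
      · exact bGo_stop full i ls hi hs
    · exact absurd (by rw [List.drop_eq_nil_iff.mpr (by omega)]; simp) hall

lemma bGo_skip (full : List Char) (l : List Char) :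
    ∀ (i ls : Nat) (t : List Char), full.drop i = l ++ '\n' :: t →
    l.all PySem.Chars.isspace → '\n' ∉ l →
    bGo full i ls = bGo full (i + (l.length + 1)) (i + (l.length + 1)) := by
  induction l with
  | nil =>
    intro i ls t hd _ _
    have hi : i < full.length := by
      by_contra hge
      rw [List.drop_eq_nil_iff.mpr (by omega)] at hd
      simp at hd
    have hcons := List.drop_eq_getElem_cons hi (l := full)
    rw [hd] at hcons
    simp only [List.nil_append] at hcons
    have hc : full[i] = '\n' := by
      injection hcons with h1 _
      exact h1.symm
    rw [bGo_newline full i ls hi hc]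
    simp
  | cons c l' ih =>
    intro i ls t hd hall hnl
    have hi : i < full.length := by
      by_contra hge
      rw [List.drop_eq_nil_iff.mpr (by omega)] at hd
      simp at hd
    have hcons := List.drop_eq_getElem_cons hi (l := full)
    rw [hd] at hcons
    simp only [List.cons_append] at hcons
    have hc : full[i] = c := by injection hcons with h1 _; exact h1.symm
    have hrest : full.drop (i + 1) = l' ++ '\n' :: t := by
      injection hcons with _ h2; exact h2.symm
    simp only [List.all_cons, Bool.and_eq_true] at hall
    have hcn : full[i] ≠ '\n' := by
      rw [hc]; rintro rfl; exact hnl (by simp)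
    rw [bGo_space full i ls hi hcn (by rw [hc]; exact hall.1)]
    rw [ih (i + 1) ls t hrest hall.2 (fun hm => hnl (by simp [hm]))]
    have e : i + 1 + (l'.length + 1) = i + ((c :: l').length + 1) := by simp; omega
    rw [e]

lemma bGo_append (pre tail : List Char) :
    ∀ (n k j : Nat), tail.length - k ≤ n → ¬ (tail.drop k).all PySem.Chars.isspace →
    bGo (pre ++ tail) (pre.length + k) (pre.length + j) = bGo tail k j := by
  intro n
  induction n with
  | zero =>
    intro k j hn hall
    exact absurd (by rw [List.drop_eq_nil_iff.mpr (by omega)]; simp) hall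
  | succ n ih =>
    intro k j hn hall
    by_cases hk : k < tail.length
    · have hik : pre.length + k < (pre ++ tail).length := by simp; omega
      have hget : (pre ++ tail)[pre.length + k] = tail[k] := by
        rw [List.getElem_append_right (by omega)]
        congr 1; omega
      by_cases hc : tail[k] = '\n'
      · rw [bGo_newline (pre ++ tail) _ _ hik (by rw [hget]; exact hc)]
        rw [bGo_newline tail k j hk hc]
        have e : pre.length + k + 1 = pre.length + (k + 1) := by omega
        rw [e]
        apply ih (k + 1) (k + 1) (by omega)
        rw [List.drop_eq_getElem_cons hk, List.all_cons, Bool.and_eq_true] at hall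
        intro h2; exact hall ⟨by rw [hc]; decide, h2⟩
      · by_cases hs : PySem.Chars.isspace tail[k]
        · rw [bGo_space (pre ++ tail) _ _ hik (by rw [hget]; exact hc) (by rw [hget]; exact hs)]
          rw [bGo_space tail k j hk hc hs]
          have e : pre.length + k + 1 = pre.length + (k + 1) := by omega
          rw [e]
          apply ih (k + 1) j (by omega)
          rw [List.drop_eq_getElem_cons hk, List.all_cons, Bool.and_eq_true] at hall
          intro h2; exact hall ⟨hs, h2⟩
        · rw [bGo_stop (pre ++ tail) _ _ hik (by rw [hget]; exact hs)]
          rw [bGo_stop tail k j hk hs]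
          rw [List.drop_append]
          simp
    · exact absurd (by rw [List.drop_eq_nil_iff.mpr (by omega)]; simp) hall

lemma newline_decomp (cs : List Char) (h : '\n' ∈ cs) :
    ∃ l t, cs = l ++ '\n' :: t ∧ '\n' ∉ l := by
  induction cs with
  | nil => simp at h
  | cons c r ih =>
    by_cases hc : c = '\n'
    · exact ⟨[], r, by simp [hc], by simp⟩
    · have hr : '\n' ∈ r := by
        rcases List.mem_cons.mp h with h1 | h1
        · exact absurd h1.symm hc
        · exact h1
      obtain ⟨l, t, h1, h2⟩ := ih hr
      exact ⟨c :: l, t, by simp [h1], by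
        intro hm
        rcases List.mem_cons.mp hm with h3 | h3
        · exact hc h3.symm
        · exact h2 h3⟩

lemma takeWhile_append_of_not_all {α : Type} (p : α → Bool) (l r : List α) (h : ¬ l.all p) :
    (l ++ r).takeWhile p = l.takeWhile p := by
  induction l with
  | nil => simp at h
  | cons c l' ih =>
    by_cases hp : p c
    · have h' : ¬ l'.all p := by
        simp only [List.all_cons, Bool.and_eq_true] at h
        intro h2; exact h ⟨hp, h2⟩
      simp [hp, ih h']
    · simp [hp]

-- A's result on the char list, with splitOn already replaced by sp
def ARes (cs : List Char) : List Char :=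
  let lines := sp cs
  let f := aFind lines 0
  if f = lines.length - 1 ∧ PySem.Chars.strip (PySem.List.pyGetD lines (-1) []) = [] then cs
  else PySem.Chars.join ['\n'] (lines.drop f)

lemma A_eq (content : String) :
    remove_leading_blank_lines content = String.ofList (ARes content.toList) := by
  simp only [remove_leading_blank_lines, ARes, splitOn_eq_sp]
  split
  · simp
  · rfl

lemma main_aux : ∀ (n : Nat) (cs : List Char), cs.length ≤ n → ARes cs = bGo cs 0 0 := by
  intro n
  induction n with
  | zero =>
    intro cs hn
    have : cs = [] := List.length_eq_zero_iff.mp (by omega)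
    subst this
    rw [bGo_ge _ _ _ (by simp)]
    simp [ARes, sp, aFind, PySem.List.pyGetD_neg_one ([[]] : List (List Char)) [] (by simp)]
  | succ n ih =>
    intro cs hn
    by_cases hall : cs.all PySem.Chars.isspace
    · -- every character is whitespace: both sides return cs
      rw [bGo_all_space cs (cs.length) 0 0 (by omega) (by simpa using hall)]
      have hblank : ∀ x ∈ sp cs, PySem.Chars.strip x = [] :=
        fun x hx => (strip_eq_nil_iff x).mpr (mem_sp_all_space cs hall x hx)
      simp only [ARes, aFind_blank (sp cs) hblank 0]
      split
      · rfl
      · rw [show (sp cs).drop 0 = sp cs by simp, join_sp]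
    · by_cases hnl : '\n' ∈ cs
      · obtain ⟨l, t, hdec, hlnl⟩ := newline_decomp cs hnl
        subst hdec
        by_cases hl : l.all PySem.Chars.isspace
        · -- first line blank: A and B both reduce to the tail after the first newline
          have htall : ¬ t.all PySem.Chars.isspace := by
            intro h2
            apply hall
            simp only [List.all_append, List.all_cons, Bool.and_eq_true]
            exact ⟨hl, by decide, h2⟩
          -- B side
          have hb : bGo (l ++ '\n' :: t) 0 0 = bGo t 0 0 := by
            rw [bGo_skip (l ++ '\n' :: t) l 0 0 t (by simp) hl hlnl]
            have e : (l ++ ['\n']).length = l.length + 1 := by simp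
            have : bGo ((l ++ ['\n']) ++ t) ((l ++ ['\n']).length + 0) ((l ++ ['\n']).length + 0) = bGo t 0 0 :=
              bGo_append (l ++ ['\n']) t t.length 0 0 (by omega) (by simpa using htall)
            simpa [e] using this
          rw [hb]
          -- A side
          have hsp : sp (l ++ '\n' :: t) = l :: sp t := sp_cons_line l t hlnl
          have hex : ∃ x ∈ sp t, PySem.Chars.strip x ≠ [] :=
            exists_nonblank_of_not_all_space t htall
          obtain ⟨hflt, hfnb⟩ := aFind_spec (sp t) hex
          have hlblank : PySem.Chars.strip l = [] := (strip_eq_nil_iff l).mpr hl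
          have hfcs : aFind (l :: sp t) 0 = 1 + aFind (sp t) 0 := by
            simp only [aFind, hlblank, ne_eq, not_true_eq_false, if_false]
            exact aFind_shift (sp t) hex 1
          have hlast : (l :: sp t).getLast (by simp) = (sp t).getLast (sp_ne_nil t) :=
            List.getLast_cons (sp_ne_nil t)
          have hgetlast : (sp t).getLast (sp_ne_nil t) = (sp t).getD ((sp t).length - 1) [] := by
            rw [List.getLast_eq_getElem]
            rw [List.getD_eq_getElem (sp t) [] (by omega)]
          -- A on cs: guard is false
          have hAcs : ARes (l ++ '\n' :: t) = PySem.Chars.join ['\n'] ((sp t).drop (aFind (sp t) 0)) := by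
            simp only [ARes, hsp, hfcs]
            rw [if_neg]
            · rw [show (1 : Nat) + aFind (sp t) 0 = aFind (sp t) 0 + 1 by omega, List.drop_succ_cons]
            · rintro ⟨h1, h2⟩
              rw [PySem.List.pyGetD_neg_one (l :: sp t) [] (by simp), hlast, hgetlast] at h2
              have : aFind (sp t) 0 = (sp t).length - 1 := by
                simp at h1; omega
              rw [← this] at h2
              exact hfnb h2
          -- A on t: guard is false
          have hAt : ARes t = PySem.Chars.join ['\n'] ((sp t).drop (aFind (sp t) 0)) := by
            simp only [ARes]
            rw [if_neg]
            rintro ⟨h1, h2⟩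
            rw [PySem.List.pyGetD_neg_one (sp t) [] (sp_ne_nil t), hgetlast, ← h1] at h2
            exact hfnb h2
          rw [hAcs, ← hAt]
          exact ih t (by simp at hn; omega)
        · -- first line has a non-whitespace char: both sides return cs
          have hcsall : ¬ (l ++ '\n' :: t).all PySem.Chars.isspace := by
            intro h2
            simp only [List.all_append, Bool.and_eq_true] at h2
            exact hl h2.1
          have hb : bGo (l ++ '\n' :: t) 0 0 = l ++ '\n' :: t := by
            rw [bGo_find (l ++ '\n' :: t) (l ++ '\n' :: t).length 0 0 (by omega)
              (by simpa using hcsall)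
              (by
                simp only [List.drop_zero]
                rw [takeWhile_append_of_not_all _ _ _ hl]
                intro hm
                exact hlnl (List.Sublist.mem hm (List.takeWhile_sublist _)))]
            simp
          rw [hb]
          have hsp : sp (l ++ '\n' :: t) = l :: sp t := sp_cons_line l t hlnl
          have hlnb : PySem.Chars.strip l ≠ [] := by
            intro h2; exact hl ((strip_eq_nil_iff l).mp h2)
          have hf0 : aFind (sp (l ++ '\n' :: t)) 0 = 0 := by
            rw [hsp]; simp [aFind, hlnb]
          simp only [ARes, hf0]
          rw [if_neg, List.drop_zero, join_sp]
          rintro ⟨h1, _⟩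
          rw [hsp] at h1
          simp at h1
          have := sp_ne_nil t
          have : (sp t).length ≥ 1 := List.length_pos_iff.mpr this
          omega
      · -- no newline at all, some non-whitespace char: both sides return cs
        have hb : bGo cs 0 0 = cs := by
          rw [bGo_find cs cs.length 0 0 (by omega) (by simpa using hall)
            (by
              simp only [List.drop_zero]
              intro hm
              exact hnl (List.Sublist.mem hm (List.takeWhile_sublist _)))]
          simp
        rw [hb]
        have hsp : sp cs = [cs] := sp_no_newline cs hnl
        have hnb : PySem.Chars.strip cs ≠ [] := by
          intro h2; exact hall ((strip_eq_nil_iff cs).mp h2)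
        have hf : aFind [cs] 0 = 0 := by simp [aFind]
        simp only [ARes, hsp, hf]
        rw [if_neg, List.drop_zero, PySem.Chars.join_singleton]
        rintro ⟨_, h2⟩
        rw [PySem.List.pyGetD_neg_one [cs] [] (by simp)] at h2
        simp [List.getLast] at h2
        exact hnb h2

lemma main_lemma : ∀ (cs : List Char), ARes cs = bGo cs 0 0 :=
  fun cs => main_aux cs.length cs (by omega)

-- ===== VERDICT (by name: the statement is the Claim_ definition above) =====
theorem remove_leading_blank_lines_spec : Claim_equal_remove_leading_blank_lines := by
  intro content _
  unfold Spec_remove_leading_blank_lines remove_leading_blank_lines_alt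
  rw [A_eq, main_lemma]
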